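-- pv_equiv track=rewrite | github.com/abhishm20/extra_repos | IMDB-spider/befrank/pipelines.py | cleanMoney
-- ===== SOURCE A (Python) =====
-- def cleanMoney(string):
--     # you could add more simpbles to this, but it gets kinda complex with some of the symbles being unicode, so I skpped that for now.
--     currencySymbles = "$"
--     cleanMoneyString = ""
--     stopAdding = False
--     for index, char in enumerate(list(string)):
--         if char in currencySymbles and not stopAdding:
--             cleanMoneyString += char
--         elif char == "," and not stopAdding:
--             cleanMoneyString += char
--         elif char.isdigit() and not stopAdding:
--             cleanMoneyString += char
--         elif char in ' ':
--             # we know that numbers do not have spaces in them, so we can assume that once the number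
--             # has started there will be no spaces
--             if len(cleanMoneyString) > 0:
--                 stopAdding = True
--
--     return cleanMoneyString
-- ===== SOURCE B (Python) =====
-- def cleanMoney(string):
--     # Find the start of the money token, then cut at the first space after it,
--     # then keep only the money characters of that prefix.
--     def qual(ch):
--         return ch == '$' or ch == ',' or ch.isdigit()
--     start = next((i for i, ch in enumerate(string) if qual(ch)), None)
--     if start is None:
--         return ""
--     body = string[start:].split(' ', 1)[0]
--     return ''.join(ch for ch in body if qual(ch))
-- ===== Notes on version B (the rewrite author's own statement) =====
-- stated objective: simpler
-- what changed: Replaces the stateful accumulate-until-space loop with three declarative steps: locate the first money character, cut the string at the first space after it, and filter the money characters out of that segment.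
import Mathlib
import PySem

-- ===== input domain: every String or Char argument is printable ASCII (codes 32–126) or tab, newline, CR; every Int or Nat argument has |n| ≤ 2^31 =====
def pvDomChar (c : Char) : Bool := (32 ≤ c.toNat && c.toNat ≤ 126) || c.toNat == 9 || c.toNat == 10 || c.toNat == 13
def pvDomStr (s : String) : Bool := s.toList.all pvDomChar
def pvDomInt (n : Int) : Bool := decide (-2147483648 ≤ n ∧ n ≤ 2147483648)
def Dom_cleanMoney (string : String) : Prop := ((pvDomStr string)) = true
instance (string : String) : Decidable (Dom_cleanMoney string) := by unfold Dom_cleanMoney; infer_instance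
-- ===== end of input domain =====

-- ===== PORT A =====
-- One honest line: B replaces A's stateful accumulate-until-space loop with find-start / cut-at-space / filter (objective: simpler).
-- Note: Python's `char in "$"` / `char in ' '` on a single character is equality with that character.
def cleanMoney (string : String) : String :=
  ((PySem.List.enumerate string.toList 0).foldl
    (fun (st : String × Bool) ic =>
      let char := ic.2
      if (char == '$') && !st.2 then (st.1.push char, st.2)
      else if (char == ',') && !st.2 then (st.1.push char, st.2)
      else if PySem.Chars.isdigit char && !st.2 then (st.1.push char, st.2)
      else if char == ' ' then (if st.1.length > 0 then (st.1, true) else st)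
      else st) ("", false)).1

-- ===== PORT B =====
def qualAlt (c : Char) : Bool := c == '$' || c == ',' || PySem.Chars.isdigit c

def cleanMoney_alt (string : String) : String :=
  -- next((i for i, ch in enumerate(string) if qual(ch)), None) = findIdx?;
  -- string[start:].split(' ', 1)[0] = takeWhile (≠ ' ') of the suffix (exact: the segment before the first space).
  match string.toList.findIdx? qualAlt with
  | none => ""
  | some i => String.ofList (((string.toList.drop i).takeWhile (fun c => c != ' ')).filter qualAlt)

-- ===== PRECONDITION & SPEC =====
def Spec_cleanMoney (string : String) (out : String) : Prop := out = cleanMoney_alt string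
instance (string : String) (out : String) : Decidable (Spec_cleanMoney string out) := by unfold Spec_cleanMoney; infer_instance

-- ===== CLAIM (what is proved, stated in full; the proofs are below) =====
def Claim_equal_cleanMoney : Prop := ∀ (string : String), Dom_cleanMoney string → Spec_cleanMoney string (cleanMoney string)

-- ===== LEMMAS AND PROOFS =====

/-- A's loop body, as structural recursion over the characters (the index is unused). -/
def loopA : List Char → String × Bool → String × Bool
  | [], st => st
  | c :: cs, st => loopA cs (
      if (c == '$') && !st.2 then (st.1.push c, st.2)
      else if (c == ',') && !st.2 then (st.1.push c, st.2)
      else if PySem.Chars.isdigit c && !st.2 then (st.1.push c, st.2)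
      else if c == ' ' then (if st.1.length > 0 then (st.1, true) else st)
      else st)

lemma cleanMoney_eq_loopA_aux (l : List Char) : ∀ (n : Int) (st : String × Bool),
    (PySem.List.enumerate l n).foldl
      (fun (st : String × Bool) ic =>
        let char := ic.2
        if (char == '$') && !st.2 then (st.1.push char, st.2)
        else if (char == ',') && !st.2 then (st.1.push char, st.2)
        else if PySem.Chars.isdigit char && !st.2 then (st.1.push char, st.2)
        else if char == ' ' then (if st.1.length > 0 then (st.1, true) else st)
        else st) st = loopA l st := by
  induction l with
  | nil => intro n st; rfl
  | cons c cs ih =>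
    intro n st
    simp only [PySem.List.enumerate_cons, List.foldl_cons, loopA]
    exact ih (n + 1) _

lemma qualAlt_ne_space {c : Char} (h : qualAlt c = true) : (c == ' ') = false := by
  cases hb : (c == ' ') with
  | false => rfl
  | true =>
    have hc : c = ' ' := by simpa using hb
    subst hc
    exact absurd h (by decide)

lemma loopA_stop (l : List Char) : ∀ acc : String, loopA l (acc, true) = (acc, true) := by
  induction l with
  | nil => intro acc; rfl
  | cons c cs ih =>
    intro acc
    simp only [loopA, Bool.not_true, Bool.and_false, Bool.false_eq_true, if_false]
    split_ifs <;> exact ih acc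

/-- the money characters of a list up to its first space -/
def fus (l : List Char) : List Char := (l.takeWhile (fun c => c != ' ')).filter qualAlt

lemma fus_cons_space (cs : List Char) : fus (' ' :: cs) = [] := by
  simp [fus]

lemma fus_cons_qual {c : Char} (cs : List Char) (h : qualAlt c = true) :
    fus (c :: cs) = c :: fus cs := by
  have hne : ¬ c = ' ' := by simpa using qualAlt_ne_space h
  simp [fus, hne, h]

lemma fus_cons_skip {c : Char} (cs : List Char) (hne : ¬ c = ' ')
    (h : qualAlt c = false) : fus (c :: cs) = fus cs := by
  simp [fus, hne, h]

lemma loopA_started (l : List Char) : ∀ (acc : String), acc.toList ≠ [] →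
    ((loopA l (acc, false)).1).toList = acc.toList ++ fus l := by
  induction l with
  | nil => intro acc _; simp [loopA, fus]
  | cons c cs ih =>
    intro acc hacc
    by_cases hq : qualAlt c = true
    · have hstep : loopA (c :: cs) (acc, false) = loopA cs (acc.push c, false) := by
        rw [loopA]
        have h := hq
        simp only [qualAlt, Bool.or_eq_true] at h
        rcases h with h | h
        · rcases h with h | h <;> simp [h]
        · simp [h]
      rw [hstep, ih (acc.push c) (by simp), fus_cons_qual cs hq]
      simp
    · have hq' : qualAlt c = false := by simpa using hq
      have h123 := hq'
      simp only [qualAlt, Bool.or_eq_false_iff] at h123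
      obtain ⟨⟨h1, h2⟩, h3⟩ := h123
      by_cases hsp : c = ' '
      · subst hsp
        have hlen : acc.length > 0 := by
          rw [show acc.length = acc.toList.length from by simp]
          exact List.length_pos_iff.mpr hacc
        rw [loopA]
        simp only [h1, h2, h3, Bool.false_and, Bool.false_eq_true, if_false,
          beq_self_eq_true, if_true, if_pos hlen]
        rw [loopA_stop, fus_cons_space]
        simp
      · have hsp' : (c == ' ') = false := by simpa using hsp
        rw [loopA]
        simp only [h1, h2, h3, hsp', Bool.false_and, Bool.false_eq_true, if_false]
        rw [ih acc hacc, fus_cons_skip cs hsp hq']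

lemma loopA_from_empty (l : List Char) :
    ((loopA l (("" : String), false)).1).toList
      = (cleanMoney_alt (String.ofList l)).toList := by
  induction l with
  | nil => simp [loopA, cleanMoney_alt]
  | cons c cs ih =>
    by_cases hq : qualAlt c = true
    · have hstep : loopA (c :: cs) (("" : String), false)
          = loopA cs (("" : String).push c, false) := by
        rw [loopA]
        have h := hq
        simp only [qualAlt, Bool.or_eq_true] at h
        rcases h with h | h
        · rcases h with h | h <;> simp [h]
        · simp [h]
      rw [hstep, loopA_started cs (("" : String).push c) (by simp)]
      have hfind : (String.ofList (c :: cs)).toList.findIdx? qualAlt = some 0 := by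
        simp [List.findIdx?_cons, hq]
      simp only [cleanMoney_alt, hfind]
      rw [show ((String.ofList (c :: cs)).toList.drop 0) = c :: cs by simp]
      have := fus_cons_qual cs hq
      simp only [fus] at this
      simp [this, fus]
    · have hq' : qualAlt c = false := by simpa using hq
      have h123 := hq'
      simp only [qualAlt, Bool.or_eq_false_iff] at h123
      obtain ⟨⟨h1, h2⟩, h3⟩ := h123
      have hstep : loopA (c :: cs) (("" : String), false)
          = loopA cs (("" : String), false) := by
        rw [loopA]
        simp only [h1, h2, h3, Bool.false_and, Bool.false_eq_true, if_false]
        split_ifs with hc hl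
        · simp at hl
        · rfl
        · rfl
      rw [hstep, ih]
      have hfind : (String.ofList (c :: cs)).toList.findIdx? qualAlt
          = ((String.ofList cs).toList.findIdx? qualAlt).map (· + 1) := by
        simp [List.findIdx?_cons, hq']
      simp only [cleanMoney_alt, hfind]
      cases hfi : (String.ofList cs).toList.findIdx? qualAlt with
      | none => simp
      | some i => simp [List.drop_succ_cons]

-- ===== VERDICT (by name: the statement is the Claim_ definition above) =====
theorem cleanMoney_spec : Claim_equal_cleanMoney := by
  intro string _
  unfold Spec_cleanMoney cleanMoney
  rw [cleanMoney_eq_loopA_aux]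
  have h := loopA_from_empty string.toList
  rw [String.ofList_toList] at h
  have := congrArg String.ofList h
  simpa using this
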